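-- pv_equiv track=rewrite | github.com/kenrollins/gemma-forge | gemma_forge/harness/loop.py | _parse_scripts
-- ===== SOURCE A (Python) =====
-- def _parse_scripts(worker_response: str) -> tuple[str, str]:
--     """Extract FIX_SCRIPT and REVERT_SCRIPT from the Worker's response.
--
--     Looks for ```bash ... ``` blocks. The first block is the fix,
--     the second is the revert.
--     """
--     blocks: list[str] = []
--     in_block = False
--     current: list[str] = []
--
--     for line in worker_response.split("\n"):
--         if line.strip().startswith("```"):
--             if in_block:
--                 blocks.append("\n".join(current))
--                 current = []
--                 in_block = False
--             else:
--                 in_block = True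
--                 current = []
--         elif in_block:
--             current.append(line)
--
--     if current and in_block:
--         blocks.append("\n".join(current))
--
--     if len(blocks) >= 2:
--         return blocks[0], blocks[1]
--     elif len(blocks) == 1:
--         return blocks[0], "echo 'NO REVERT SCRIPT PROVIDED'"
--     else:
--         return worker_response, "echo 'COULD NOT PARSE SCRIPTS'"
-- ===== SOURCE B (Python) =====
-- def _parse_scripts(worker_response: str) -> tuple[str, str]:
--     """Extract FIX_SCRIPT and REVERT_SCRIPT from the Worker's response.
--
--     Consumes the lines as a stack: repeatedly skip to the next opening
--     fence, collect the block content up to the closing fence (or end of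
--     input for a trailing unclosed block), and record the block.
--     """
--     rev = worker_response.split("\n")
--     rev.reverse()
--     blocks: list[str] = []
--     while True:
--         while rev and not rev[-1].strip().startswith("```"):
--             rev.pop()
--         if not rev:
--             break
--         rev.pop()  # opening fence
--         content: list[str] = []
--         while rev and not rev[-1].strip().startswith("```"):
--             content.append(rev.pop())
--         if rev:
--             rev.pop()  # closing fence
--             blocks.append("\n".join(content))
--         else:
--             if content:
--                 blocks.append("\n".join(content))
--             break
--
--     if len(blocks) >= 2:
--         return blocks[0], blocks[1]
--     elif len(blocks) == 1:
--         return blocks[0], "echo 'NO REVERT SCRIPT PROVIDED'"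
--     else:
--         return worker_response, "echo 'COULD NOT PARSE SCRIPTS'"
-- ===== Notes on version B (the rewrite author's own statement) =====
-- stated objective: alternative
-- what changed: Replaces A's single-pass toggle state machine (in_block flag plus current accumulator threaded through one fold) by a block-at-a-time consumer: skip to the next fence, collect up to the closing fence, emit the block, repeat; the trailing unclosed block is a separate explicit case instead of leftover loop state.
import Mathlib
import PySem

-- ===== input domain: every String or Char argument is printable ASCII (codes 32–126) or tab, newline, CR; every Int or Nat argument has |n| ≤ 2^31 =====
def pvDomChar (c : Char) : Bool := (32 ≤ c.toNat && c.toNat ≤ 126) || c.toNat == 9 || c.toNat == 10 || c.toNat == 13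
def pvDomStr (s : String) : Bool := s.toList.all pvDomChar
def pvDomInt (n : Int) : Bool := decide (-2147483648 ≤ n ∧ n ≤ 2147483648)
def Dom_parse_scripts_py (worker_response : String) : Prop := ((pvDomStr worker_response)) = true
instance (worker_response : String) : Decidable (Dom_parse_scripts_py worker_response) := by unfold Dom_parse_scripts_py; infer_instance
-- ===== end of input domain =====

-- B replaces A's toggle state machine by a block-at-a-time consumer (skip to fence, collect to
-- closing fence, repeat); same O(n) cost, different decomposition (objective: alternative).

-- ===== PORT A =====
-- one loop step of A: state = (blocks, in_block, current)
def pvStepA (s : List String × Bool × List String) (line : String) :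
    List String × Bool × List String :=
  if PySem.Str.startswith (PySem.Str.strip line) "```" then
    if s.2.1 then (s.1 ++ [PySem.Str.join "\n" s.2.2], false, [])
    else (s.1, true, [])
  else if s.2.1 then (s.1, s.2.1, s.2.2 ++ [line])
  else s

def parse_scripts_py (worker_response : String) : String × String :=
  let lines := (PySem.Str.split? worker_response "\n").getD []
  let st : List String × Bool × List String := lines.foldl pvStepA ([], false, [])
  -- `if current and in_block: blocks.append(...)`
  let blocks := if !st.2.2.isEmpty && st.2.1 then st.1 ++ [PySem.Str.join "\n" st.2.2] else st.1
  if blocks.length ≥ 2 then (blocks[0]?.getD "", blocks[1]?.getD "")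
  else if blocks.length = 1 then (blocks[0]?.getD "", "echo 'NO REVERT SCRIPT PROVIDED'")
  else (worker_response, "echo 'COULD NOT PARSE SCRIPTS'")

-- ===== PORT B =====
def pvFenceB (line : String) : Bool := PySem.Str.startswith (PySem.Str.strip line) "```"

-- `while rev and not fence(rev[-1]): rev.pop()`
def pvSkipB : List String → List String
  | [] => []
  | l :: t => if pvFenceB l then l :: t else pvSkipB t

-- `while rev and not fence(rev[-1]): content.append(rev.pop())` — returns (content, rest)
def pvCollectB : List String → List String × List String
  | [] => ([], [])
  | l :: t =>
    if pvFenceB l then ([], l :: t)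
    else
      let p := pvCollectB t
      (l :: p.1, p.2)

theorem pvSkipB_length_le (ls : List String) : (pvSkipB ls).length ≤ ls.length := by
  induction ls with
  | nil => simp [pvSkipB]
  | cons l t ih =>
    simp only [pvSkipB]
    split
    · simp
    · simp only [List.length_cons]; omega

theorem pvCollectB_length_le (ls : List String) : (pvCollectB ls).2.length ≤ ls.length := by
  induction ls with
  | nil => simp [pvCollectB]
  | cons l t ih =>
    simp only [pvCollectB]
    split
    · simp
    · simp only [List.length_cons]; omega

-- the outer `while True` loop, consuming the line stack block by block
def pvBlocksB (ls : List String) : List String :=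
  let s := pvSkipB ls
  if _hs : s = [] then []
  else
    let p := pvCollectB s.tail
    if _hr : p.2 = [] then (if p.1.isEmpty then [] else [PySem.Str.join "\n" p.1])
    else PySem.Str.join "\n" p.1 :: pvBlocksB p.2.tail
termination_by ls.length
decreasing_by
  have hs1 := pvSkipB_length_le ls
  have hc := pvCollectB_length_le (pvSkipB ls).tail
  have h2 : 1 ≤ (pvSkipB ls).length := by
    cases h : pvSkipB ls with
    | nil => exact absurd h _hs
    | cons a b => simp
  have h3 : 1 ≤ (pvCollectB (pvSkipB ls).tail).2.length := by
    cases h : (pvCollectB (pvSkipB ls).tail).2 with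
    | nil => exact absurd h _hr
    | cons a b => simp
  simp only [List.length_tail] at *
  omega

def parse_scripts_py_alt (worker_response : String) : String × String :=
  let blocks := pvBlocksB ((PySem.Str.split? worker_response "\n").getD [])
  if blocks.length ≥ 2 then (blocks[0]?.getD "", blocks[1]?.getD "")
  else if blocks.length = 1 then (blocks[0]?.getD "", "echo 'NO REVERT SCRIPT PROVIDED'")
  else (worker_response, "echo 'COULD NOT PARSE SCRIPTS'")

-- ===== PRECONDITION & SPEC =====
def Spec_parse_scripts_py (worker_response : String) (out : String × String) : Prop := out = parse_scripts_py_alt worker_response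
instance (worker_response : String) (out : String × String) : Decidable (Spec_parse_scripts_py worker_response out) := by unfold Spec_parse_scripts_py; infer_instance

-- ===== CLAIM (what is proved, stated in full; the proofs are below) =====
def Claim_equal_parse_scripts_py : Prop := ∀ (worker_response : String), Dom_parse_scripts_py worker_response → Spec_parse_scripts_py worker_response (parse_scripts_py worker_response)

-- ===== LEMMAS AND PROOFS =====

-- A's post-loop append, applied to a final state
def pvFinishA (s : List String × Bool × List String) : List String :=
  if !s.2.2.isEmpty && s.2.1 then s.1 ++ [PySem.Str.join "\n" s.2.2] else s.1

-- B's behaviour while "inside a block": content collected so far is `cur`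
def pvBlocksInB (cur : List String) (ls : List String) : List String :=
  let p := pvCollectB ls
  if p.2 = [] then (if (cur ++ p.1).isEmpty then [] else [PySem.Str.join "\n" (cur ++ p.1)])
  else PySem.Str.join "\n" (cur ++ p.1) :: pvBlocksB p.2.tail

theorem pvBlocksB_nil : pvBlocksB [] = [] := by
  rw [pvBlocksB]; simp [pvSkipB]

theorem pvBlocksB_cons (l : String) (t : List String) :
    pvBlocksB (l :: t) = if pvFenceB l then pvBlocksInB [] t else pvBlocksB t := by
  by_cases h : pvFenceB l = true
  · rw [pvBlocksB]
    simp only [pvSkipB, h, if_true]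
    simp only [pvBlocksInB, List.nil_append, List.tail_cons]
    split
    · simp_all
    · simp_all
  · conv_lhs => rw [pvBlocksB]
    conv_rhs => rw [pvBlocksB]
    simp only [pvSkipB, h, Bool.false_eq_true, if_false]

theorem pvBlocksInB_cons (cur : List String) (l : String) (t : List String) :
    pvBlocksInB cur (l :: t) =
      if pvFenceB l then PySem.Str.join "\n" cur :: pvBlocksB t
      else pvBlocksInB (cur ++ [l]) t := by
  by_cases h : pvFenceB l = true
  · simp [pvBlocksInB, pvCollectB, h]
  · simp only [pvBlocksInB, pvCollectB, h, Bool.false_eq_true, if_false]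
    split
    · simp_all
    · simp_all

-- the main invariant: folding A's step from either phase produces B's blocks
theorem pvMain (ls : List String) :
    (∀ bs cur, pvFinishA (ls.foldl pvStepA (bs, false, cur)) = bs ++ pvBlocksB ls) ∧
    (∀ bs cur, pvFinishA (ls.foldl pvStepA (bs, true, cur)) = bs ++ pvBlocksInB cur ls) := by
  induction ls with
  | nil =>
    constructor
    · intro bs cur
      simp [pvFinishA, pvBlocksB_nil]
    · intro bs cur
      simp only [List.foldl_nil, pvFinishA, pvBlocksInB, pvCollectB]
      cases cur <;> simp
  | cons l t ih =>
    obtain ⟨ihF, ihT⟩ := ih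
    constructor
    · intro bs cur
      rw [pvBlocksB_cons]
      by_cases h : pvFenceB l = true
      · have h' : PySem.Str.startswith (PySem.Str.strip l) "```" = true := h
        simp only [List.foldl_cons, pvStepA, h', if_true, Bool.false_eq_true, if_false, h,
          ihT bs []]
      · have h' : PySem.Str.startswith (PySem.Str.strip l) "```" = false := by
          simpa [pvFenceB] using h
        simp only [List.foldl_cons, pvStepA, h', Bool.false_eq_true, if_false, h,
          ihF bs cur]
    · intro bs cur
      rw [pvBlocksInB_cons]
      by_cases h : pvFenceB l = true
      · have h' : PySem.Str.startswith (PySem.Str.strip l) "```" = true := h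
        simp only [List.foldl_cons, pvStepA, h', if_true, h, ihF (bs ++ [PySem.Str.join "\n" cur]) [],
          List.append_assoc, List.singleton_append]
      · have h' : PySem.Str.startswith (PySem.Str.strip l) "```" = false := by
          simpa [pvFenceB] using h
        simp only [List.foldl_cons, pvStepA, h', Bool.false_eq_true, if_false, if_true, h,
          ihT bs (cur ++ [l])]

-- ===== VERDICT (by name: the statement is the Claim_ definition above) =====
theorem parse_scripts_py_spec : Claim_equal_parse_scripts_py := by
  intro wr _
  unfold Spec_parse_scripts_py parse_scripts_py parse_scripts_py_alt
  have h := (pvMain ((PySem.Str.split? wr "\n").getD [])).1 [] []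
  simp only [pvFinishA] at h
  simp only [h, List.nil_append]
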